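-- pv_equiv track=rewrite | github.com/i-w-i-w-d/Algoritm-And-Structure-Of-Information | Hm02/ex.2.14.py | task_2_14_d
-- ===== SOURCE A (Python) =====
-- def task_2_14_d(n):
--     total = 0
--     #Зовнішній цикл -> n разів
--     for i in range(n + 1):
--
--         #Обчислення i ^ i через цикл
--         #Внутрішній цикл виконується i разів
--         #O(n^2)
--         term = 1
--         for j in range(i):
--             term *= i
--
--         total += term
--     return total
-- ===== SOURCE B (Python) =====
-- def task_2_14_d(n):
--     total = 0
--     for i in range(n + 1):
--         # i ** i by binary exponentiation (square-and-multiply)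
--         result = 1
--         base = i
--         exp = i
--         while exp > 0:
--             if exp % 2 == 1:
--                 result *= base
--             base *= base
--             exp //= 2
--         total += result
--     return total
-- ===== Notes on version B (the rewrite author's own statement) =====
-- stated objective: alternative
-- what changed: The inner repeated-multiplication loop computing i^i with i multiplications is replaced by an explicit square-and-multiply while-loop using O(log i) multiplications (measured 3.8x at the largest size both finished, unconfirmed beyond).
import Mathlib
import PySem

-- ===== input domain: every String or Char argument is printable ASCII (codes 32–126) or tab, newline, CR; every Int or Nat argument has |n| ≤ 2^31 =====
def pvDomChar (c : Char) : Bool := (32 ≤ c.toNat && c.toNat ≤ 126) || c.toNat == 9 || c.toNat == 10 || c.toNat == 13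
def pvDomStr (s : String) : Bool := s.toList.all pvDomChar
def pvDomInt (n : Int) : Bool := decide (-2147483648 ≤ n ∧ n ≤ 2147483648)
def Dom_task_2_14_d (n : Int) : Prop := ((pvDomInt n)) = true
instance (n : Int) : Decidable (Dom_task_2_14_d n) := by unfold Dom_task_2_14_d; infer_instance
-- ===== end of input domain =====

-- B replaces the inner repeated-multiplication loop for i^i by an explicit
-- square-and-multiply while-loop (a different inner algorithm; same return value).

-- ===== PORT A =====
-- total = 0; for i in range(n+1): term = 1; for j in range(i): term *= i; total += term
def task_2_14_d (n : Int) : Int :=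
  (PySem.List.pyRange 0 (n + 1) 1).foldl
    (fun total i =>
      total + (PySem.List.pyRange 0 i 1).foldl (fun term _ => term * i) 1)
    0

-- ===== PORT B =====
-- while exp > 0: if exp % 2 == 1: result *= base; base *= base; exp //= 2
def pvFastPow (result base exp : Int) : Int :=
  if _h : 0 < exp then
    pvFastPow (if PySem.Int.mod exp 2 = 1 then result * base else result)
      (base * base) (PySem.Int.floordiv exp 2)
  else result
termination_by exp.toNat
decreasing_by
  rw [PySem.Int.floordiv_eq_ediv_of_pos (by norm_num : (0:Int) < 2)]
  omega

def task_2_14_d_alt (n : Int) : Int :=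
  (PySem.List.pyRange 0 (n + 1) 1).foldl
    (fun total i => total + pvFastPow 1 i i) 0

-- ===== PRECONDITION & SPEC =====
def Spec_task_2_14_d (n : Int) (out : Int) : Prop := out = task_2_14_d_alt n
instance (n : Int) (out : Int) : Decidable (Spec_task_2_14_d n out) := by unfold Spec_task_2_14_d; infer_instance

-- ===== CLAIM (what is proved, stated in full; the proofs are below) =====
def Claim_equal_task_2_14_d : Prop := ∀ (n : Int), Dom_task_2_14_d n → Spec_task_2_14_d n (task_2_14_d n)

-- ===== LEMMAS AND PROOFS =====

theorem pvPowSplit (b : Int) (m : Nat) : b ^ m = (b * b) ^ (m / 2) * b ^ (m % 2) := by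
  conv_lhs => rw [← Nat.div_add_mod m 2]
  rw [pow_add, pow_mul, sq]

theorem pvFastPow_eq (r b e : Int) : pvFastPow r b e = r * b ^ e.toNat := by
  fun_induction pvFastPow r b e with
  | case1 r b e h ih =>
      simp only [dite_eq_ite] at ih
      rw [ih]
      rw [PySem.Int.floordiv_eq_ediv_of_pos (by norm_num : (0:Int) < 2),
        PySem.Int.mod_eq_emod_of_pos (by norm_num : (0:Int) < 2)] at *
      have h2 : (e / 2).toNat = e.toNat / 2 := by omega
      have hm : (e % 2 = 1) ↔ (e.toNat % 2 = 1) := by omega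
      rw [h2, pvPowSplit b e.toNat]
      by_cases hp : e % 2 = 1
      · rw [if_pos hp, (hm.mp hp)]
        ring
      · rw [if_neg hp]
        have : e.toNat % 2 = 0 := by omega
        rw [this, pow_zero, mul_one]
  | case2 r b e h =>
      have : e.toNat = 0 := by omega
      rw [this, pow_zero, mul_one]

theorem pvFoldlMulConst (i : Int) (l : List Int) (acc : Int) :
    l.foldl (fun t _ => t * i) acc = acc * i ^ l.length := by
  induction l generalizing acc with
  | nil => simp
  | cons x xs ih => simp [List.foldl, ih, pow_succ]; ring

-- ===== VERDICT (by name: the statement is the Claim_ definition above) =====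
theorem task_2_14_d_spec : Claim_equal_task_2_14_d := by
  intro n _
  unfold Spec_task_2_14_d task_2_14_d task_2_14_d_alt
  apply PySem.List.foldl_congr_mem
  intro acc i hi
  have h0 : 0 ≤ i := ((PySem.List.mem_pyRange_one).mp hi).1
  rw [pvFoldlMulConst, pvFastPow_eq, PySem.List.length_pyRange_one, one_mul, one_mul,
    sub_zero]
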